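-- pv_equiv track=rewrite | github.com/wietzesuijker/data-model | src/eopf_geozarr/conversion/fs_utils.py | normalize_s3_path
-- ===== SOURCE A (Python) =====
-- def normalize_s3_path(s3_path: str) -> str:
--     """
--     Normalize an S3 path by removing double slashes and ensuring proper format.
--
--     This is important for OVH S3 which is sensitive to double slashes.
--
--     Parameters
--     ----------
--     s3_path : str
--         S3 path to normalize
--
--     Returns
--     -------
--     str
--         Normalized S3 path
--     """
--     if not s3_path.startswith("s3://"):
--         return s3_path
--
--     # Split into scheme and path parts
--     scheme = "s3://"
--     path_part = s3_path[5:]  # Remove "s3://"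
--
--     # Remove double slashes from the path part
--     # But preserve the bucket/key structure
--     parts = path_part.split("/")
--     # Filter out empty parts (which come from double slashes)
--     normalized_parts = [part for part in parts if part]
--
--     # Reconstruct the path
--     if normalized_parts:
--         normalized_path = scheme + "/".join(normalized_parts)
--     else:
--         normalized_path = scheme
--
--     return normalized_path
-- ===== SOURCE B (Python) =====
-- def normalize_s3_path(s3_path: str) -> str:
--     """One-pass scan: emit non-slash segments on the fly instead of split/filter/join."""
--     if not s3_path.startswith("s3://"):
--         return s3_path
--     out = ""
--     seg = ""
--     for ch in s3_path[5:]: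
--         if ch == "/":
--             if seg:
--                 out = seg if not out else out + "/" + seg
--                 seg = ""
--         else:
--             seg += ch
--     if seg:
--         out = seg if not out else out + "/" + seg
--     return "s3://" + out
-- ===== Notes on version B (the rewrite author's own statement) =====
-- stated objective: alternative
-- what changed: Replaces the split-on-slash + list-comprehension filter + join pipeline with a single character scan that accumulates the current segment and appends it (with a separator when needed) the moment it closes, never materialising the parts list.
import Mathlib
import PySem

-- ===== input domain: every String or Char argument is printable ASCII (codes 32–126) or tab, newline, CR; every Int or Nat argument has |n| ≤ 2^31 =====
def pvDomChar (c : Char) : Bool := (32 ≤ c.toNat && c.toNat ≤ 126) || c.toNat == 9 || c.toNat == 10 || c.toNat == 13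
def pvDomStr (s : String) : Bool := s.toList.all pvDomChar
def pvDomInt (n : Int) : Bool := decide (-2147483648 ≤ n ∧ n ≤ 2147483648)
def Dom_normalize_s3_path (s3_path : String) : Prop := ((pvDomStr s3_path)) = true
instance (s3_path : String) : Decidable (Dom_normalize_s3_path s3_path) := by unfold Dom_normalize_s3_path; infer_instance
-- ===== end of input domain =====

-- B replaces split('/') + filter + join with a one-pass scan that emits each segment as it closes; same return value on all inputs.

-- ===== PORT A =====
def normalize_s3_path (s3_path : String) : String :=
  if PySem.Str.startswith s3_path "s3://" = false then s3_path
  else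
    let scheme := "s3://"
    let path_part := PySem.Chars.slice s3_path.toList (some 5) none
    let parts := PySem.Chars.splitOn path_part "/".toList
    let normalized_parts := parts.filter (fun p => p ≠ [])
    if normalized_parts ≠ [] then
      String.mk (scheme.toList ++ PySem.Chars.join "/".toList normalized_parts)
    else scheme

-- ===== PORT B =====
-- Source B: out = seg if not out else out + "/" + seg
def pvEmit (out seg : List Char) : List Char :=
  if out = [] then seg else out ++ '/' :: seg

-- Source B's loop body, state = (out, seg)
def pvStep (st : List Char × List Char) (ch : Char) : List Char × List Char :=
  if ch = '/' then
    if st.2 ≠ [] then (pvEmit st.1 st.2, []) else st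
  else (st.1, st.2 ++ [ch])

def normalize_s3_path_alt (s3_path : String) : String :=
  if PySem.Str.startswith s3_path "s3://" = false then s3_path
  else
    let st := (PySem.Chars.slice s3_path.toList (some 5) none).foldl pvStep ([], [])
    let out := if st.2 ≠ [] then pvEmit st.1 st.2 else st.1
    String.mk ("s3://".toList ++ out)

-- ===== PRECONDITION & SPEC =====
def Spec_normalize_s3_path (s3_path : String) (out : String) : Prop := out = normalize_s3_path_alt s3_path
instance (s3_path : String) (out : String) : Decidable (Spec_normalize_s3_path s3_path out) := by unfold Spec_normalize_s3_path; infer_instance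

-- ===== CLAIM (what is proved, stated in full; the proofs are below) =====
def Claim_equal_normalize_s3_path : Prop := ∀ (s3_path : String), Dom_normalize_s3_path s3_path → Spec_normalize_s3_path s3_path (normalize_s3_path s3_path)

-- ===== LEMMAS AND PROOFS =====

-- reference splitter (cur is the reversed current token)
def pvSplit : List Char → List Char → List (List Char)
  | [], cur => [cur.reverse]
  | c :: rest, cur => if c = '/' then cur.reverse :: pvSplit rest [] else pvSplit rest (c :: cur)

theorem go_eq : ∀ (fuel : Nat) (l cur : List Char) (acc : List (List Char)), l.length < fuel →
    PySem.Chars.splitOn.go ['/'] fuel l cur acc = acc.reverse ++ pvSplit l cur := by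
  intro fuel
  induction fuel with
  | zero => intro l cur acc h; omega
  | succ f ih =>
    intro l cur acc h
    cases l with
    | nil => rw [PySem.Chars.splitOn.go.eq_def]; simp [pvSplit]
    | cons c rest =>
      rw [PySem.Chars.splitOn.go.eq_def]
      by_cases hc : c = '/'
      · subst hc
        have hp : List.isPrefixOf ['/'] ('/' :: rest) = true := by
          simp [List.isPrefixOf]
        simp only [pvSplit, hp, if_pos]
        rw [ih _ _ _ (by simpa using Nat.lt_of_succ_lt_succ h)]
        simp
      · have hp : List.isPrefixOf ['/'] (c :: rest) = false := by
          simp [List.isPrefixOf]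
          exact fun h' => hc (Eq.symm h')
        simp only [hp, Bool.false_eq_true, if_false, pvSplit, if_neg hc]
        exact ih _ _ _ (by simpa using Nat.lt_of_succ_lt_succ h)

theorem splitOn_eq (l : List Char) : PySem.Chars.splitOn l ['/'] = pvSplit l [] := by
  unfold PySem.Chars.splitOn
  rw [go_eq (l.length + 1) l [] [] (by omega)]
  simp

-- the B loop plus final flush computes a left fold of pvEmit over the filtered tokens
theorem foldl_inv : ∀ (l out seg : List Char),
    (let st := l.foldl pvStep (out, seg);
     if st.2 ≠ [] then pvEmit st.1 st.2 else st.1)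
    = ((pvSplit l seg.reverse).filter (fun p => p ≠ [])).foldl pvEmit out := by
  intro l
  induction l with
  | nil =>
    intro out seg
    simp only [List.foldl_nil, pvSplit, List.reverse_reverse]
    by_cases hs : seg = []
    · simp [hs]
    · simp [hs]
  | cons c rest ih =>
    intro out seg
    by_cases hc : c = '/'
    · subst hc
      by_cases hs : seg = []
      · simp only [List.foldl_cons, pvStep, if_true, hs]
        simpa [pvSplit, hs] using ih out []
      · simp only [List.foldl_cons, pvStep, if_true, ne_eq, hs, not_false_eq_true]
        have := ih (pvEmit out seg) []
        simp only [List.reverse_nil] at this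
        rw [this]
        simp [pvSplit, List.reverse_reverse, hs]
    · simp only [List.foldl_cons, pvStep, if_neg hc]
      have := ih out (seg ++ [c])
      simp only [List.reverse_append, List.reverse_cons, List.reverse_nil, List.nil_append,
        List.singleton_append] at this
      rw [this]
      simp [pvSplit, hc]

theorem foldl_emit_ne (ps : List (List Char)) : ∀ (out : List Char), out ≠ [] →
    ps.foldl pvEmit out = out ++ ps.flatMap (fun q => '/' :: q) := by
  induction ps with
  | nil => intro out h; simp
  | cons p rest ih =>
    intro out h
    simp only [List.foldl_cons, pvEmit, if_neg h]
    rw [ih _ (by simp [h])]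
    simp

theorem join_eq_flatMap (ps : List (List Char)) : ∀ (p : List Char),
    PySem.Chars.join ['/'] (p :: ps) = p ++ ps.flatMap (fun q => '/' :: q) := by
  induction ps with
  | nil => intro p; simp [PySem.Chars.join, List.intercalate]
  | cons q rest ih =>
    intro p
    have h2 : PySem.Chars.join ['/'] (p :: q :: rest) =
        p ++ '/' :: PySem.Chars.join ['/'] (q :: rest) := by
      simp [PySem.Chars.join, List.intercalate, List.intersperse]
    rw [h2, ih q]
    simp

theorem foldl_emit_join (ps : List (List Char)) (h : ∀ p ∈ ps, p ≠ []) :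
    ps.foldl pvEmit [] = PySem.Chars.join ['/'] ps := by
  cases ps with
  | nil => simp [PySem.Chars.join, List.intercalate]
  | cons p rest =>
    simp only [List.foldl_cons, pvEmit, if_true]
    rw [foldl_emit_ne rest p (h p (by simp)), join_eq_flatMap]

-- ===== VERDICT (by name: the statement is the Claim_ definition above) =====
theorem normalize_s3_path_spec : Claim_equal_normalize_s3_path := by
  intro s3_path _
  unfold Spec_normalize_s3_path normalize_s3_path normalize_s3_path_alt
  cases hb : PySem.Str.startswith s3_path "s3://" with
  | false => simp
  | true =>
    simp only [Bool.true_eq_false, if_false]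
    have hlist : "/".toList = ['/'] := rfl
    rw [hlist, splitOn_eq]
    have hinv := foldl_inv (PySem.Chars.slice s3_path.toList (some 5) none) [] []
    simp only [List.reverse_nil] at hinv
    rw [hinv]
    set fps := (pvSplit (PySem.Chars.slice s3_path.toList (some 5) none) []).filter
      (fun p => p ≠ []) with hfps
    have hne : ∀ p ∈ fps, p ≠ [] := by
      intro p hp
      have := List.of_mem_filter hp
      simpa using this
    rw [foldl_emit_join fps hne]
    by_cases hf : fps = []
    · rw [if_neg (by simp [hf]), hf]
      have : PySem.Chars.join ['/'] ([] : List (List Char)) = [] := by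
        simp [PySem.Chars.join, List.intercalate]
      rw [this]
      simp only [List.append_nil]
      rfl
    · rw [if_pos hf]
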